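-- pv_equiv track=rewrite | github.com/ling168x/python_100examples | no.15_example.py | onCount
-- ===== SOURCE A (Python) =====
-- def onCount(lenght, connect):
-- 	count = 0
-- 	net = 0
-- 	while lenght > net:
-- 		net_list = []
-- 		net += 6
-- 		for i in connect:
-- 			if net in range(i[0], i[1]+1):
-- 				net_list.append(i[1])
-- 		if net_list:
-- 			net = max(net_list)
-- 		count += 1
-- 	return count
-- ===== SOURCE B (Python) =====
-- def _cand(net, i):
--     # smallest landing point p = net + 6*k (k >= 1) lying inside interval i, or None
--     a, b = i[0], i[1]
--     k = -((net - a) // 6)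
--     if k < 1:
--         k = 1
--     p = net + 6 * k
--     if a <= p <= b:
--         return p
--     return None
--
--
-- def onCount(lenght, connect):
--     count = 0
--     net = 0
--     while lenght > net:
--         best = None  # nearest point reachable by 6-steps that lies in some interval
--         for i in connect:
--             p = _cand(net, i)
--             if p is not None and (best is None or p < best):
--                 best = p
--         k_end = -((net - lenght) // 6)  # plain 6-steps until net >= lenght
--         if best is not None and (best - net) // 6 <= k_end:
--             count += (best - net) // 6
--             net = max(i[1] for i in connect if i[0] <= best <= i[1])
--         else:
--             count += k_end
--             net += 6 * k_end
--     return count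
-- ===== Notes on version B (the rewrite author's own statement) =====
-- stated objective: faster
-- what changed: A advances the pointer one 6-step per loop iteration, rescanning all intervals each time; B is an event loop that computes the number of plain 6-steps across each uncovered gap arithmetically (ceil division), finds the nearest landing point inside any interval in one scan, and jumps interval to interval.
import Mathlib
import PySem

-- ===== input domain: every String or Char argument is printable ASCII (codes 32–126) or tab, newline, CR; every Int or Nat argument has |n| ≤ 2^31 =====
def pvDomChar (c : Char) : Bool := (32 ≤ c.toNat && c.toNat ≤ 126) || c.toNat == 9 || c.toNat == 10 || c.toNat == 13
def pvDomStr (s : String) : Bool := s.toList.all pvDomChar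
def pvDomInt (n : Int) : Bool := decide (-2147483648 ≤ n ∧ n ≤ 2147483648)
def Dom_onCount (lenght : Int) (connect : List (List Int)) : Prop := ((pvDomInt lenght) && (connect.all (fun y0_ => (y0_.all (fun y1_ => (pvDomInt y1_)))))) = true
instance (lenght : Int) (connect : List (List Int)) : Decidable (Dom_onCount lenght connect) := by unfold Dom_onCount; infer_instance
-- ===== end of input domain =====

-- B replaces A's one-6-step-per-loop-iteration scan by an event loop that counts the plain
-- 6-steps across each uncovered gap arithmetically and jumps from interval to interval;
-- objective: faster.

-- ===== PORT A =====
-- net_list of one iteration: the endpoints i[1] of the intervals with net ∈ range(i[0], i[1]+1)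
def covListA (connect : List (List Int)) (net : Int) : List Int :=
  connect.foldl (fun acc i =>
    if (PySem.List.pyGet? i 0).getD 0 ≤ net ∧ net ≤ (PySem.List.pyGet? i 1).getD 0
    then acc ++ [(PySem.List.pyGet? i 1).getD 0] else acc) []

-- one iteration of A's while body acting on net: net += 6; if net_list: net = max(net_list)
def stepA (connect : List (List Int)) (net : Int) : Int :=
  match PySem.List.max? (covListA connect (net + 6)) (fun x => x) with
  | some m => m
  | none => net + 6

theorem mem_covListA_ge {connect : List (List Int)} {net x : Int}
    (h : x ∈ covListA connect net) : net ≤ x := by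
  unfold covListA at h
  suffices H : ∀ (l : List (List Int)) (acc : List Int),
      (∀ y ∈ acc, net ≤ y) → ∀ y ∈ l.foldl (fun acc i =>
        if (PySem.List.pyGet? i 0).getD 0 ≤ net ∧ net ≤ (PySem.List.pyGet? i 1).getD 0
        then acc ++ [(PySem.List.pyGet? i 1).getD 0] else acc) acc, net ≤ y by
    exact H connect [] (by simp) x h
  intro l
  induction l with
  | nil => intro acc hacc y hy; exact hacc y hy
  | cons i t ih =>
    intro acc hacc y hy
    refine ih _ ?_ y hy
    intro z hz
    by_cases hc : (PySem.List.pyGet? i 0).getD 0 ≤ net ∧ net ≤ (PySem.List.pyGet? i 1).getD 0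
    · simp [hc] at hz
      rcases hz with hz | hz
      · exact hacc z hz
      · omega
    · simp [hc] at hz; exact hacc z hz

theorem stepA_ge (connect : List (List Int)) (net : Int) : net + 6 ≤ stepA connect net := by
  unfold stepA
  cases h : PySem.List.max? (covListA connect (net + 6)) (fun x => x) with
  | none => simp
  | some m => simpa using mem_covListA_ge (PySem.List.max?_mem h)

def loopA (connect : List (List Int)) (lenght net : Int) : Int :=
  if lenght > net then loopA connect lenght (stepA connect net) + 1 else 0
termination_by (lenght - net).toNat
decreasing_by have := stepA_ge connect net; omega

def onCount (lenght : Int) (connect : List (List Int)) : Int := loopA connect lenght 0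

-- ===== PORT B =====
-- i[0], i[1] of an interval
def candA (i : List Int) : Int := (PySem.List.pyGet? i 0).getD 0
def candB (i : List Int) : Int := (PySem.List.pyGet? i 1).getD 0
-- k of _cand: ceil((a - net)/6), at least 1
def candK (net : Int) (i : List Int) : Int :=
  max 1 (-(PySem.Int.floordiv (net - candA i) 6))
-- p of _cand
def candP (net : Int) (i : List Int) : Int := net + 6 * candK net i
-- _cand: smallest landing point p = net + 6*k (k ≥ 1) lying inside interval i, or None
def cand (net : Int) (i : List Int) : Option Int :=
  if candA i ≤ candP net i ∧ candP net i ≤ candB i then some (candP net i) else none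

-- one step of the inner for loop accumulating best
def bstep (net : Int) (best : Option Int) (i : List Int) : Option Int :=
  match cand net i with
  | some p => match best with
    | none => some p
    | some q => if p < q then some p else best
  | none => best

def bestLand (connect : List (List Int)) (net : Int) : Option Int :=
  connect.foldl (bstep net) none

-- k_end: plain 6-steps from net until net >= lenght
def kEndF (net lenght : Int) : Int := -(PySem.Int.floordiv (net - lenght) 6)

-- the generator element of the max(...) jump: i[1] if i[0] <= p <= i[1] else skipped
def covf (p : Int) (i : List Int) : Option Int :=
  if candA i ≤ p ∧ p ≤ candB i then some (candB i) else none

-- max(i[1] for i in connect if i[0] <= best <= i[1])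
def jumpTo (connect : List (List Int)) (p : Int) : Int :=
  (PySem.List.max? (connect.filterMap (covf p)) (fun x => x)).getD 0

-- reduction lemmas for bstep (needed by the lemmas loopB's termination proof cites)
theorem bstep_none {net : Int} {i : List Int} (h : cand net i = none) (best : Option Int) :
    bstep net best i = best := by unfold bstep; rw [h]

theorem bstep_some_none {net : Int} {i : List Int} {p : Int} (h : cand net i = some p) :
    bstep net none i = some p := by unfold bstep; rw [h]

theorem bstep_some_some {net : Int} {i : List Int} {p q : Int} (h : cand net i = some p) :
    bstep net (some q) i = if p < q then some p else some q := by unfold bstep; rw [h]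

theorem cand_ge {net : Int} {i : List Int} {p : Int} (h : cand net i = some p) :
    net + 6 ≤ p ∧ (6 : Int) ∣ (p - net) ∧ candA i ≤ p ∧ p ≤ candB i := by
  unfold cand at h
  by_cases hc : candA i ≤ candP net i ∧ candP net i ≤ candB i
  · rw [if_pos hc] at h
    cases h
    have h1 : (1 : Int) ≤ candK net i := le_max_left _ _
    exact ⟨by unfold candP; omega, ⟨candK net i, by unfold candP; ring⟩, hc.1, hc.2⟩
  · rw [if_neg hc] at h; cases h

theorem bestLand_some {connect : List (List Int)} {net p : Int}
    (h : bestLand connect net = some p) : ∃ i ∈ connect, cand net i = some p := by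
  unfold bestLand at h
  suffices H : ∀ (l : List (List Int)) (acc : Option Int),
      l.foldl (bstep net) acc = some p → acc = some p ∨ ∃ i ∈ l, cand net i = some p by
    rcases H connect none h with h' | h'
    · cases h'
    · exact h'
  intro l
  induction l with
  | nil => intro acc hacc; exact Or.inl hacc
  | cons i t ih =>
    intro acc hacc
    simp only [List.foldl_cons] at hacc
    rcases ih (bstep net acc i) hacc with h' | ⟨j, hj, hcj⟩
    · cases hc : cand net i with
      | none => rw [bstep_none hc] at h'; exact Or.inl h'
      | some q =>
        cases acc with
        | none =>
          rw [bstep_some_none hc] at h'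
          cases h'
          exact Or.inr ⟨i, by simp, hc⟩
        | some r =>
          rw [bstep_some_some hc] at h'
          by_cases hlt : q < r
          · rw [if_pos hlt] at h'; cases h'; exact Or.inr ⟨i, by simp, hc⟩
          · rw [if_neg hlt] at h'; exact Or.inl h'
    · exact Or.inr ⟨j, by simp [hj], hcj⟩

theorem jumpTo_ge {connect : List (List Int)} {net p : Int}
    (h : bestLand connect net = some p) : net + 6 ≤ jumpTo connect p := by
  obtain ⟨i, hi, hc⟩ := bestLand_some h
  obtain ⟨hge, _, ha, hb⟩ := cand_ge hc
  have hmem : candB i ∈ connect.filterMap (covf p) := by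
    refine List.mem_filterMap.2 ⟨i, hi, ?_⟩
    unfold covf; rw [if_pos ⟨ha, hb⟩]
  unfold jumpTo
  cases hm : PySem.List.max? (connect.filterMap (covf p)) (fun x => x) with
  | none =>
    rw [PySem.List.max?_eq_none_iff] at hm
    rw [hm] at hmem; cases hmem
  | some m =>
    have h2 : candB i ≤ m := PySem.List.max?_isMax hm (candB i) hmem
    simp only [Option.getD_some]
    omega

def loopB (connect : List (List Int)) (lenght net : Int) : Int :=
  if lenght > net then
    match h : bestLand connect net with
    | some p =>
      if PySem.Int.floordiv (p - net) 6 ≤ kEndF net lenght then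
        PySem.Int.floordiv (p - net) 6 + loopB connect lenght (jumpTo connect p)
      else kEndF net lenght + loopB connect lenght (net + 6 * kEndF net lenght)
    | none => kEndF net lenght + loopB connect lenght (net + 6 * kEndF net lenght)
  else 0
termination_by (lenght - net).toNat
decreasing_by
  · have := jumpTo_ge h; omega
  · have h6 : 0 < (6:Int) := by omega
    unfold kEndF
    have := PySem.Int.floordiv_eq_ediv_of_pos (a := net - lenght) h6
    omega
  · have h6 : 0 < (6:Int) := by omega
    unfold kEndF
    have := PySem.Int.floordiv_eq_ediv_of_pos (a := net - lenght) h6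
    omega

def onCount_alt (lenght : Int) (connect : List (List Int)) : Int := loopB connect lenght 0

-- ===== PRECONDITION & SPEC =====
-- Pre_ excludes exactly the inputs where A raises IndexError: lenght > 0 together with some
-- interval of fewer than two entries (the loop body indexes i[0] and i[1] of every interval).
def Pre_onCount (lenght : Int) (connect : List (List Int)) : Prop :=
  lenght ≤ 0 ∨ ∀ i ∈ connect, 2 ≤ i.length
instance (lenght : Int) (connect : List (List Int)) : Decidable (Pre_onCount lenght connect) := by
  unfold Pre_onCount; infer_instance

def pvWitness_onCount : Int × List (List Int) := (20, [[3, 9], [14, 30]])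

def Spec_onCount (lenght : Int) (connect : List (List Int)) (out : Int) : Prop := out = onCount_alt lenght connect
instance (lenght : Int) (connect : List (List Int)) (out : Int) : Decidable (Spec_onCount lenght connect out) := by unfold Spec_onCount; infer_instance

-- ===== CLAIM (what is proved, stated in full; the proofs are below) =====
def Claim_equal_onCount : Prop := ∀ (lenght : Int) (connect : List (List Int)), Dom_onCount lenght connect → Pre_onCount lenght connect → Spec_onCount lenght connect (onCount lenght connect)

-- ===== LEMMAS AND PROOFS =====

-- unfolding lemmas for loopB with the inner match resolved
theorem loopB_stop {connect : List (List Int)} {lenght net : Int} (h : ¬ lenght > net) :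
    loopB connect lenght net = 0 := by rw [loopB, if_neg h]

theorem loopB_some {connect : List (List Int)} {lenght net p : Int} (h : lenght > net)
    (hb : bestLand connect net = some p) :
    loopB connect lenght net =
      if PySem.Int.floordiv (p - net) 6 ≤ kEndF net lenght then
        PySem.Int.floordiv (p - net) 6 + loopB connect lenght (jumpTo connect p)
      else kEndF net lenght + loopB connect lenght (net + 6 * kEndF net lenght) := by
  rw [loopB, if_pos h]
  split
  · rename_i p' hp'
    rw [hb] at hp'
    injection hp' with hpp
    subst hpp
    rfl
  · rename_i hp'
    rw [hb] at hp'
    cases hp'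

theorem loopB_none {connect : List (List Int)} {lenght net : Int} (h : lenght > net)
    (hb : bestLand connect net = none) :
    loopB connect lenght net = kEndF net lenght + loopB connect lenght (net + 6 * kEndF net lenght) := by
  rw [loopB, if_pos h]
  split
  · rename_i p' hp'
    rw [hb] at hp'
    cases hp'
  · rfl

-- the point net is covered by some interval of connect
def Cov (connect : List (List Int)) (net : Int) : Prop :=
  ∃ i ∈ connect, candA i ≤ net ∧ net ≤ candB i

theorem covListA_eq_filterMap (connect : List (List Int)) (net : Int) :
    covListA connect net = connect.filterMap (covf net) := by
  unfold covListA
  suffices H : ∀ (l : List (List Int)) (acc : List Int),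
      l.foldl (fun acc i =>
        if (PySem.List.pyGet? i 0).getD 0 ≤ net ∧ net ≤ (PySem.List.pyGet? i 1).getD 0
        then acc ++ [(PySem.List.pyGet? i 1).getD 0] else acc) acc
      = acc ++ l.filterMap (covf net) by
    simpa using H connect []
  intro l
  induction l with
  | nil => intro acc; simp
  | cons i t ih =>
    intro acc
    simp only [List.foldl_cons, List.filterMap_cons]
    by_cases hc : candA i ≤ net ∧ net ≤ candB i
    · rw [if_pos (show (PySem.List.pyGet? i 0).getD 0 ≤ net ∧ net ≤ (PySem.List.pyGet? i 1).getD 0 from hc),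
        ih, show covf net i = some (candB i) from by unfold covf; rw [if_pos hc]]
      simp [candB]
    · rw [if_neg (show ¬((PySem.List.pyGet? i 0).getD 0 ≤ net ∧ net ≤ (PySem.List.pyGet? i 1).getD 0) from hc),
        ih, show covf net i = none from by unfold covf; rw [if_neg hc]]

theorem covListA_nil_iff {connect : List (List Int)} {net : Int} :
    covListA connect net = [] ↔ ¬ Cov connect net := by
  rw [covListA_eq_filterMap, List.filterMap_eq_nil_iff]
  unfold Cov covf
  constructor
  · rintro h ⟨i, hi, hc⟩
    have := h i hi
    rw [if_pos hc] at this; cases this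
  · intro h i hi
    by_cases hc : candA i ≤ net ∧ net ≤ candB i
    · exact absurd ⟨i, hi, hc⟩ h
    · rw [if_neg hc]

-- when net+6 is covered by interval i, the landing point of i is net+6 itself
theorem cand_of_cover {net : Int} {i : List Int}
    (ha : candA i ≤ net + 6) (hb : net + 6 ≤ candB i) : cand net i = some (net + 6) := by
  have h6 : (0:Int) < 6 := by omega
  have hd := PySem.Int.floordiv_eq_ediv_of_pos (a := net - candA i) h6
  have hk : candK net i = 1 := by unfold candK; rw [hd]; omega
  have hp : candP net i = net + 6 := by unfold candP; rw [hk]; ring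
  unfold cand
  rw [hp, if_pos ⟨ha, hb⟩]

-- when net+6 is not covered by interval i, the candidate is unchanged by a plain step
theorem cand_shift {net : Int} {i : List Int}
    (h : ¬(candA i ≤ net + 6 ∧ net + 6 ≤ candB i)) : cand net i = cand (net + 6) i := by
  have h6 : (0:Int) < 6 := by omega
  have hd := PySem.Int.floordiv_eq_ediv_of_pos (a := net - candA i) h6
  have hd' := PySem.Int.floordiv_eq_ediv_of_pos (a := net + 6 - candA i) h6
  by_cases hc : 2 ≤ -((net - candA i) / 6)
  · have hk : candK net i = -((net - candA i) / 6) := by unfold candK; rw [hd]; omega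
    have hk' : candK (net + 6) i = -((net - candA i) / 6) - 1 := by
      unfold candK; rw [hd']; omega
    have hp : candP (net + 6) i = candP net i := by unfold candP; rw [hk, hk']; ring
    unfold cand
    rw [hp]
  · have hk : candK net i = 1 := by unfold candK; rw [hd]; omega
    have hp : candP net i = net + 6 := by unfold candP; rw [hk]; ring
    have hale : candA i ≤ net + 6 := by omega
    have hble : candB i < net + 6 := by
      rcases not_and_or.1 h with h' | h'
      · exact absurd hale h'
      · omega
    have hk1' : (1:Int) ≤ candK (net + 6) i := le_max_left _ _
    have hp' : net + 12 ≤ candP (net + 6) i := by unfold candP; omega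
    unfold cand
    rw [hp, if_neg (by omega), if_neg (by omega)]

-- the fold computes the minimum landing point when one is known
theorem bfold_exact (net m : Int) :
    ∀ (l : List (List Int)) (acc : Option Int),
      (∀ i ∈ l, ∀ q, cand net i = some q → m ≤ q) →
      (acc = some m ∨ ((acc = none ∨ ∃ q, acc = some q ∧ m < q) ∧ ∃ i ∈ l, cand net i = some m)) →
      l.foldl (bstep net) acc = some m := by
  intro l
  induction l with
  | nil =>
    intro acc _ hacc
    rcases hacc with h | ⟨_, i, hi, _⟩
    · simpa using h
    · simp at hi
  | cons i t ih =>
    intro acc hub hacc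
    simp only [List.foldl_cons]
    rcases hacc with hm | ⟨hav, j, hj, hcj⟩
    · subst hm
      refine ih _ (fun i hi => hub i (by simp [hi])) (Or.inl ?_)
      cases hc : cand net i with
      | none => exact bstep_none hc _
      | some q =>
        have := hub i (by simp) q hc
        rw [bstep_some_some hc, if_neg (by omega)]
    · by_cases hci : cand net i = some m
      · refine ih _ (fun i hi => hub i (by simp [hi])) (Or.inl ?_)
        rcases hav with h | ⟨q, hq, hlt⟩
        · rw [h]; exact bstep_some_none hci
        · rw [hq, bstep_some_some hci, if_pos hlt]
      · have hj' : j ∈ t := by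
          rcases List.mem_cons.1 hj with h | h
          · subst h; exact absurd hcj hci
          · exact h
        refine ih _ (fun i hi => hub i (by simp [hi])) (Or.inr ⟨?_, j, hj', hcj⟩)
        cases hc : cand net i with
        | none => rw [bstep_none hc]; exact hav
        | some q =>
          have hmq : m ≤ q := hub i (by simp) q hc
          have hqm : m < q := lt_of_le_of_ne hmq (fun h => hci (h ▸ hc))
          rcases hav with h | ⟨r, hr, hlt⟩
          · rw [h, bstep_some_none hc]; exact Or.inr ⟨q, rfl, hqm⟩
          · rw [hr, bstep_some_some hc]
            by_cases h' : q < r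
            · rw [if_pos h']; exact Or.inr ⟨q, rfl, hqm⟩
            · rw [if_neg h']; exact Or.inr ⟨r, rfl, hlt⟩

theorem bestLand_congr {connect : List (List Int)} {n1 n2 : Int}
    (h : ∀ i ∈ connect, cand n1 i = cand n2 i) :
    bestLand connect n1 = bestLand connect n2 := by
  unfold bestLand
  suffices H : ∀ (l : List (List Int)) (acc : Option Int),
      (∀ i ∈ l, cand n1 i = cand n2 i) →
      l.foldl (bstep n1) acc = l.foldl (bstep n2) acc by
    exact H connect none h
  intro l
  induction l with
  | nil => intro acc _; rfl
  | cons i t ih =>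
    intro acc hl
    simp only [List.foldl_cons]
    have hstep : bstep n1 acc i = bstep n2 acc i := by
      unfold bstep; rw [hl i (by simp)]
    rw [hstep]
    exact ih _ (fun j hj => hl j (by simp [hj]))

-- covered case: bestLand finds net+6 and the jump target is exactly stepA's max
theorem bestLand_of_cover {connect : List (List Int)} {net : Int}
    (h : Cov connect (net + 6)) : bestLand connect net = some (net + 6) := by
  obtain ⟨i, hi, ha, hb⟩ := h
  exact bfold_exact net (net + 6) connect none
    (fun j _ q hq => (cand_ge hq).1) (Or.inr ⟨Or.inl rfl, i, hi, cand_of_cover ha hb⟩)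

theorem jumpTo_eq_stepA {connect : List (List Int)} {net : Int}
    (h : Cov connect (net + 6)) : jumpTo connect (net + 6) = stepA connect net := by
  unfold jumpTo stepA
  rw [← covListA_eq_filterMap]
  cases hm : PySem.List.max? (covListA connect (net + 6)) (fun x => x) with
  | none =>
    rw [PySem.List.max?_eq_none_iff, covListA_nil_iff] at hm
    exact absurd h hm
  | some m => rfl

theorem stepA_uncovered {connect : List (List Int)} {net : Int}
    (h : ¬ Cov connect (net + 6)) : stepA connect net = net + 6 := by
  unfold stepA
  rw [show PySem.List.max? (covListA connect (net + 6)) (fun x => x) = none from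
    (PySem.List.max?_eq_none_iff _ _).2 (covListA_nil_iff.2 h)]

-- key: one unfolding of A's loop is absorbed by B's batch loop
theorem key_step (connect : List (List Int)) (lenght net : Int) (h : lenght > net) :
    loopB connect lenght net = 1 + loopB connect lenght (stepA connect net) := by
  have h6 : (0:Int) < 6 := by omega
  have hkEnd := PySem.Int.floordiv_eq_ediv_of_pos (a := net - lenght) h6
  by_cases hcov : Cov connect (net + 6)
  · -- net+6 is covered: B jumps after exactly one counted step
    have hk1 : PySem.Int.floordiv (net + 6 - net) 6 = 1 := by
      rw [PySem.Int.floordiv_eq_ediv_of_pos h6]; omega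
    have hkE : 1 ≤ kEndF net lenght := by unfold kEndF; omega
    rw [loopB_some h (bestLand_of_cover hcov), hk1, if_pos hkE, jumpTo_eq_stepA hcov]
  · -- net+6 uncovered: stepA is a plain step and B's plan is unchanged
    have hstep := stepA_uncovered hcov
    have hbl : bestLand connect net = bestLand connect (net + 6) :=
      bestLand_congr (fun i hi => cand_shift (fun hc => hcov ⟨i, hi, hc⟩))
    rw [hstep]
    have hkEnd' := PySem.Int.floordiv_eq_ediv_of_pos (a := net + 6 - lenght) h6
    by_cases h' : lenght > net + 6
    · -- both sides still loop; k_end and the landing distance each shrink by one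
      have hkshift : kEndF net lenght = kEndF (net + 6) lenght + 1 := by
        unfold kEndF
        rw [hkEnd, hkEnd']
        omega
      have htgt : net + 6 * kEndF net lenght = net + 6 + 6 * kEndF (net + 6) lenght := by
        rw [hkshift]; ring
      cases hb : bestLand connect (net + 6) with
      | none =>
        rw [loopB_none h (hbl.trans hb), loopB_none h' hb, htgt, hkshift]
        ring
      | some p =>
        obtain ⟨hge, hdvd, -, -⟩ := cand_ge (bestLand_some hb).choose_spec.2
        have hkp := PySem.Int.floordiv_eq_ediv_of_pos (a := p - net) h6
        have hkp' := PySem.Int.floordiv_eq_ediv_of_pos (a := p - (net + 6)) h6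
        have hpshift : PySem.Int.floordiv (p - net) 6 = PySem.Int.floordiv (p - (net + 6)) 6 + 1 := by
          rw [hkp, hkp']; omega
        rw [loopB_some h (hbl.trans hb), loopB_some h' hb]
        by_cases hcnd : PySem.Int.floordiv (p - (net + 6)) 6 ≤ kEndF (net + 6) lenght
        · rw [if_pos hcnd, if_pos (by rw [hpshift, hkshift]; omega), hpshift]; ring
        · rw [if_neg hcnd, if_neg (by rw [hpshift, hkshift]; omega), htgt, hkshift]; ring
    · -- lenght ≤ net+6: one counted step finishes; B's batch is that single step
      have hkE1 : kEndF net lenght = 1 := by unfold kEndF; omega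
      have hzero : loopB connect lenght (net + 6) = 0 := loopB_stop h'
      cases hb : bestLand connect (net + 6) with
      | none =>
        rw [loopB_none h (hbl.trans hb), hkE1,
          show net + 6 * (1:Int) = net + 6 from by ring, hzero]
      | some p =>
        obtain ⟨hge, hdvd, -, -⟩ := cand_ge (bestLand_some hb).choose_spec.2
        have hkp := PySem.Int.floordiv_eq_ediv_of_pos (a := p - net) h6
        have hcnd : ¬ PySem.Int.floordiv (p - net) 6 ≤ kEndF net lenght := by
          rw [hkp, hkE1]; omega
        rw [loopB_some h (hbl.trans hb), if_neg hcnd, hkE1,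
          show net + 6 * (1:Int) = net + 6 from by ring, hzero]

theorem loop_eq (connect : List (List Int)) (lenght net : Int) :
    loopA connect lenght net = loopB connect lenght net := by
  rw [loopA]
  by_cases h : lenght > net
  · rw [if_pos h, loop_eq connect lenght (stepA connect net), key_step connect lenght net h]
    ring
  · rw [if_neg h, loopB_stop h]
termination_by (lenght - net).toNat
decreasing_by have := stepA_ge connect net; omega

-- ===== VERDICT (by name: the statement is the Claim_ definition above) =====
theorem onCount_spec : Claim_equal_onCount := by
  intro lenght connect _ _
  unfold Spec_onCount onCount onCount_alt
  exact loop_eq connect lenght 0
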